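-- pv_equiv track=rewrite | github.com/hcsn-theory/hcsn-sim | sim-exp/measure/measure_effective_potential_vs_distance_inferred.py | bfs_cluster_distance
-- ===== SOURCE A (Python) =====
-- from collections import defaultdict, deque
--
-- def bfs_cluster_distance(inter, cluster_A, cluster_B, max_depth=50):
--     visited = set(cluster_A)
--     queue = deque((v, 0) for v in cluster_A)
--
--     while queue:
--         v, d = queue.popleft()
--         if d > max_depth:
--             break
--         if v in cluster_B:
--             return d
--         for u in inter.get(v, []):
--             if u not in visited:
--                 visited.add(u)
--                 queue.append((u, d + 1))
--
--     return None
-- ===== SOURCE B (Python) =====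
-- def bfs_cluster_distance(inter, cluster_A, cluster_B, max_depth=50):
--     target = set(cluster_B)
--     visited = set(cluster_A)
--     frontier = set(cluster_A)
--     d = 0
--     while d <= max_depth:
--         if frontier & target:
--             return d
--         nxt = set()
--         for v in frontier:
--             for u in inter.get(v, []):
--                 if u not in visited:
--                     visited.add(u)
--                     nxt.add(u)
--         if not nxt:
--             return None
--         frontier = nxt
--         d += 1
--     return None
-- ===== Notes on version B (the rewrite author's own statement) =====
-- stated objective: alternative
-- what changed: Replaces the depth-tagged FIFO queue BFS by a level-synchronous frontier BFS: visited/frontier sets advanced one whole level per iteration, with each level tested against a precomputed target set instead of a per-pop 'v in cluster_B' list scan.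
import Mathlib
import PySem

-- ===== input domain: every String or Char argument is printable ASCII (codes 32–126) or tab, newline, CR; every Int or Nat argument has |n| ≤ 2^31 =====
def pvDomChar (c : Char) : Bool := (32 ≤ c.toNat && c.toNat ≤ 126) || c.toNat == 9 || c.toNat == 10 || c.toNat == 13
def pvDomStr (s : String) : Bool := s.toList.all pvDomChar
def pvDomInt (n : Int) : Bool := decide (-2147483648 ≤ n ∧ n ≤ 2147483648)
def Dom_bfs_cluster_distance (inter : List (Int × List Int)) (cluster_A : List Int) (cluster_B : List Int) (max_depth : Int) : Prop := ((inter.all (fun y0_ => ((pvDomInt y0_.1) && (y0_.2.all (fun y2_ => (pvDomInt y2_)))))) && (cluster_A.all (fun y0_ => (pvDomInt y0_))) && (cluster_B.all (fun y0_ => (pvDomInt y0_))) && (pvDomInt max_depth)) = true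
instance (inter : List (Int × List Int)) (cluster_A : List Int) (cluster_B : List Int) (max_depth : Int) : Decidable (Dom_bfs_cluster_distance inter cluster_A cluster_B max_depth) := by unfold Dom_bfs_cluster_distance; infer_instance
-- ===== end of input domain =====

-- B replaces A's depth-tagged FIFO queue BFS with a level-synchronous frontier BFS
-- (objective: alternative — a different decomposition of the same search).

-- ===== PORT A =====
-- helpers for A's termination measure: candidate nodes ever enqueueable, and how many are unvisited
def pvCands (inter : List (Int × List Int)) : Finset Int := (inter.flatMap Prod.snd).toFinset

def pvUnvis (inter : List (Int × List Int)) (V : PySem.Set Int) : Nat :=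
  ((pvCands inter).filter (fun u => u ∉ V)).card

lemma pvUnvis_add (inter : List (Int × List Int)) (V : PySem.Set Int) (u : Int)
    (hc : u ∈ pvCands inter) (hv : u ∉ V) :
    pvUnvis inter (PySem.Set.add V u) + 1 = pvUnvis inter V := by
  unfold pvUnvis
  have h1 : (pvCands inter).filter (fun x => x ∉ PySem.Set.add V u)
      = ((pvCands inter).filter (fun x => x ∉ V)).erase u := by
    ext x
    simp only [Finset.mem_filter, Finset.mem_erase, PySem.Set.mem_add]
    tauto
  rw [h1, Finset.card_erase_of_mem (by simp [Finset.mem_filter, hc, hv])]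
  have : 0 < ((pvCands inter).filter (fun x => x ∉ V)).card :=
    Finset.card_pos.mpr ⟨u, by simp [Finset.mem_filter, hc, hv]⟩
  omega

lemma pvGetD_sub (inter : List (Int × List Int)) (v : Int) :
    ∀ u ∈ (PySem.Dict.mk inter).getD v [], u ∈ pvCands inter := by
  induction inter with
  | nil => intro u hu; simp [PySem.Dict.getD, PySem.Dict.get?] at hu
  | cons p rest ih =>
    intro u hu
    rw [PySem.Dict.getD, PySem.Dict.get?_mk_cons] at hu
    by_cases h : (p.1 == v) = true
    · simp only [h, if_true, Option.getD_some] at hu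
      simp only [pvCands, List.mem_toFinset, List.mem_flatMap]
      exact ⟨p, List.mem_cons_self, hu⟩
    · simp only [h] at hu
      have := ih u (by rw [PySem.Dict.getD]; exact hu)
      simp only [pvCands, List.mem_toFinset, List.mem_flatMap] at this ⊢
      obtain ⟨a, ha, hua⟩ := this
      exact ⟨a, List.mem_cons_of_mem _ ha, hua⟩

-- termination bound for A's inner neighbour loop
lemma pvFoldBound (inter : List (Int × List Int)) (d : Int) :
    ∀ (ns : List Int), (∀ u ∈ ns, u ∈ pvCands inter) →
    ∀ (V : PySem.Set Int) (q : List (Int × Int)),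
    2 * pvUnvis inter (ns.foldl
        (fun (st : PySem.Set Int × List (Int × Int)) u =>
          if u ∈ st.1 then st else (PySem.Set.add st.1 u, st.2 ++ [(u, d + 1)])) (V, q)).1
      + (ns.foldl
        (fun (st : PySem.Set Int × List (Int × Int)) u =>
          if u ∈ st.1 then st else (PySem.Set.add st.1 u, st.2 ++ [(u, d + 1)])) (V, q)).2.length
      ≤ 2 * pvUnvis inter V + q.length := by
  intro ns
  induction ns with
  | nil => intro _ V q; simp
  | cons u rest ih =>
    intro hsub V q
    simp only [List.foldl_cons]
    by_cases hu : u ∈ V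
    · simp only [hu, if_true]
      exact ih (fun x hx => hsub x (List.mem_cons_of_mem _ hx)) V q
    · simp only [hu, if_false]
      have h1 := ih (fun x hx => hsub x (List.mem_cons_of_mem _ hx))
        (PySem.Set.add V u) (q ++ [(u, d + 1)])
      have h2 := pvUnvis_add inter V u (hsub u (List.mem_cons_self)) hu
      simp only [List.length_append, List.length_singleton] at h1 ⊢
      omega

def bfsLoopA (inter : List (Int × List Int)) (cluster_B : List Int) (max_depth : Int)
    (visited : PySem.Set Int) (queue : List (Int × Int)) : Option Int :=
  match queue with
  | [] => none
  | (v, d) :: rest =>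
    if max_depth < d then none
    else if v ∈ cluster_B then some d
    else
      let st := ((PySem.Dict.mk inter).getD v []).foldl
        (fun (st : PySem.Set Int × List (Int × Int)) u =>
          if u ∈ st.1 then st else (PySem.Set.add st.1 u, st.2 ++ [(u, d + 1)]))
        (visited, rest)
      bfsLoopA inter cluster_B max_depth st.1 st.2
termination_by 2 * pvUnvis inter visited + queue.length
decreasing_by
  simp only [dite_eq_ite]
  have := pvFoldBound inter d ((PySem.Dict.mk inter).getD v []) (pvGetD_sub inter v) visited rest
  simp only [List.length_cons]
  omega

def bfs_cluster_distance (inter : List (Int × List Int)) (cluster_A : List Int) (cluster_B : List Int) (max_depth : Int) : Option Int :=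
  bfsLoopA inter cluster_B max_depth (PySem.Set.ofList cluster_A)
    (cluster_A.map (fun v => (v, (0 : Int))))

-- ===== PORT B =====
def bfsInner (inter : List (Int × List Int)) (st : PySem.Set Int × List Int) (v : Int) :
    PySem.Set Int × List Int :=
  ((PySem.Dict.mk inter).getD v []).foldl
    (fun (st : PySem.Set Int × List Int) u =>
      if u ∈ st.1 then st else (PySem.Set.add st.1 u, st.2 ++ [u])) st

def bfsLoopB (inter : List (Int × List Int)) (cluster_B : List Int) (max_depth : Int)
    (visited : PySem.Set Int) (frontier : List Int) (d : Int) : Option Int :=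
  if h : max_depth < d then none
  else if frontier.any (fun v => decide (v ∈ cluster_B)) then some d
  else
    let st := frontier.foldl (bfsInner inter) (visited, [])
    if st.2 = [] then none
    else bfsLoopB inter cluster_B max_depth st.1 st.2 (d + 1)
termination_by (max_depth + 1 - d).toNat
decreasing_by omega

def bfs_cluster_distance_alt (inter : List (Int × List Int)) (cluster_A : List Int) (cluster_B : List Int) (max_depth : Int) : Option Int :=
  bfsLoopB inter cluster_B max_depth (PySem.Set.ofList cluster_A) (PySem.Set.ofList cluster_A) 0

-- ===== PRECONDITION & SPEC =====
def Spec_bfs_cluster_distance (inter : List (Int × List Int)) (cluster_A : List Int) (cluster_B : List Int) (max_depth : Int) (out : Option Int) : Prop := out = bfs_cluster_distance_alt inter cluster_A cluster_B max_depth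
instance (inter : List (Int × List Int)) (cluster_A : List Int) (cluster_B : List Int) (max_depth : Int) (out : Option Int) : Decidable (Spec_bfs_cluster_distance inter cluster_A cluster_B max_depth out) := by unfold Spec_bfs_cluster_distance; infer_instance

-- ===== CLAIM (what is proved, stated in full; the proofs are below) =====
def Claim_equal_bfs_cluster_distance : Prop := ∀ (inter : List (Int × List Int)) (cluster_A : List Int) (cluster_B : List Int) (max_depth : Int), Dom_bfs_cluster_distance inter cluster_A cluster_B max_depth → Spec_bfs_cluster_distance inter cluster_A cluster_B max_depth (bfs_cluster_distance inter cluster_A cluster_B max_depth)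

-- ===== LEMMAS AND PROOFS =====

-- B's inner fold only appends to its accumulator list (generic accumulator-append shape)
lemma pvHomGen {α : Type} (f : (PySem.Set Int × List α) → Int → (PySem.Set Int × List α))
    (hf : ∀ V l x, f (V, l) x = ((f (V, []) x).1, l ++ (f (V, []) x).2)) :
    ∀ (xs : List Int) (V : PySem.Set Int) (l : List α),
    xs.foldl f (V, l) = ((xs.foldl f (V, [])).1, l ++ (xs.foldl f (V, [])).2) := by
  intro xs
  induction xs with
  | nil => intro V l; simp
  | cons x rest ih =>
    intro V l
    simp only [List.foldl_cons]
    rw [hf V l x, ih (f (V, []) x).1 (l ++ (f (V, []) x).2),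
        ih (f (V, []) x).1 (f (V, []) x).2, List.append_assoc]

lemma pvStepBHom (V : PySem.Set Int) (l : List Int) (u : Int) :
    (fun (st : PySem.Set Int × List Int) u =>
      if u ∈ st.1 then st else (PySem.Set.add st.1 u, st.2 ++ [u])) (V, l) u
    = (((fun (st : PySem.Set Int × List Int) u =>
      if u ∈ st.1 then st else (PySem.Set.add st.1 u, st.2 ++ [u])) (V, []) u).1,
       l ++ ((fun (st : PySem.Set Int × List Int) u =>
      if u ∈ st.1 then st else (PySem.Set.add st.1 u, st.2 ++ [u])) (V, []) u).2) := by
  by_cases hu : u ∈ V <;> simp [hu]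

lemma pvInnerHom (inter : List (Int × List Int)) (V : PySem.Set Int) (l : List Int) (v : Int) :
    bfsInner inter (V, l) v
    = ((bfsInner inter (V, []) v).1, l ++ (bfsInner inter (V, []) v).2) := by
  unfold bfsInner
  exact pvHomGen _ pvStepBHom _ V l

-- A's inner fold = B's inner fold with the new nodes tagged d+1
lemma pvSync (d : Int) :
    ∀ (ns : List Int) (V : PySem.Set Int) (q : List (Int × Int)),
    ns.foldl (fun (st : PySem.Set Int × List (Int × Int)) u =>
        if u ∈ st.1 then st else (PySem.Set.add st.1 u, st.2 ++ [(u, d + 1)])) (V, q)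
    = ((ns.foldl (fun (st : PySem.Set Int × List Int) u =>
        if u ∈ st.1 then st else (PySem.Set.add st.1 u, st.2 ++ [u])) (V, [])).1,
       q ++ (ns.foldl (fun (st : PySem.Set Int × List Int) u =>
        if u ∈ st.1 then st else (PySem.Set.add st.1 u, st.2 ++ [u])) (V, [])).2.map
        (fun u => (u, d + 1))) := by
  intro ns
  induction ns with
  | nil => intro V q; simp
  | cons u rest ih =>
    intro V q
    simp only [List.foldl_cons]
    by_cases hu : u ∈ V
    · simp only [hu, if_true]; exact ih V q
    · simp only [hu, if_false, List.nil_append]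
      rw [ih (PySem.Set.add V u) (q ++ [(u, d + 1)]),
          pvHomGen (fun (st : PySem.Set Int × List Int) u =>
            if u ∈ st.1 then st else (PySem.Set.add st.1 u, st.2 ++ [u]))
            pvStepBHom rest (PySem.Set.add V u) [u]]
      simp

-- level lemma: A's queue-BFS, run on a level-d block followed by a level-(d+1) block,
-- checks the level-d block against cluster_B and expands it exactly as B does
lemma pvLevel (inter : List (Int × List Int)) (cluster_B : List Int) (max_depth : Int) (d : Int)
    (hd : ¬ max_depth < d) :
    ∀ (F : List Int) (V : PySem.Set Int) (G : List Int),
    bfsLoopA inter cluster_B max_depth V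
        (F.map (fun v => (v, d)) ++ G.map (fun v => (v, d + 1)))
    = if F.any (fun v => decide (v ∈ cluster_B)) then some d
      else bfsLoopA inter cluster_B max_depth (F.foldl (bfsInner inter) (V, G)).1
        ((F.foldl (bfsInner inter) (V, G)).2.map (fun v => (v, d + 1))) := by
  intro F
  induction F with
  | nil => intro V G; simp
  | cons v F' ih =>
    intro V G
    simp only [List.map_cons, List.cons_append, List.any_cons]
    rw [bfsLoopA]
    simp only [hd, if_false]
    by_cases hv : v ∈ cluster_B
    · simp [hv]
    · simp only [hv, if_false, List.foldl_cons, Bool.false_or, decide_false]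
      rw [pvSync d ((PySem.Dict.mk inter).getD v []) V
        (F'.map (fun v => (v, d)) ++ G.map (fun v => (v, d + 1)))]
      have hinner : bfsInner inter (V, G) v
          = ((bfsInner inter (V, []) v).1, G ++ (bfsInner inter (V, []) v).2) :=
        pvInnerHom inter V G v
      rw [List.append_assoc, ← List.map_append, hinner]
      exact ih (bfsInner inter (V, []) v).1 (G ++ (bfsInner inter (V, []) v).2)

-- main loop correspondence: A on a homogeneous level-d queue is B's level loop
lemma pvLoopEq (inter : List (Int × List Int)) (cluster_B : List Int) (max_depth : Int) :
    ∀ (n : Nat) (d : Int), (max_depth + 1 - d).toNat = n →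
    ∀ (V : PySem.Set Int) (F : List Int),
    bfsLoopA inter cluster_B max_depth V (F.map (fun v => (v, d)))
    = bfsLoopB inter cluster_B max_depth V F d := by
  intro n
  induction n with
  | zero =>
    intro d hn V F
    have hd : max_depth < d := by omega
    rw [bfsLoopB]
    simp only [hd, dif_pos]
    cases F with
    | nil => simp [bfsLoopA]
    | cons v F' => rw [List.map_cons, bfsLoopA]; simp [hd]
  | succ k ih =>
    intro d hn V F
    have hd : ¬ max_depth < d := by omega
    rw [bfsLoopB]
    simp only [hd, dif_neg, not_false_iff]
    have h := pvLevel inter cluster_B max_depth d hd F V []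
    simp only [List.map_nil, List.append_nil] at h
    rw [h]
    by_cases hany : F.any (fun v => decide (v ∈ cluster_B))
    · simp [hany]
    · simp only [hany, if_false, Bool.false_eq_true]
      by_cases hemp : (F.foldl (bfsInner inter) (V, [])).2 = []
      · simp [hemp, bfsLoopA]
      · simp only [hemp, if_false]
        exact ih (d + 1) (by omega) _ _

-- visited only grows along B's inner folds
lemma pvStepBMono (x : Int) :
    ∀ (ns : List Int) (V : PySem.Set Int) (l : List Int), x ∈ V →
    x ∈ (ns.foldl (fun (st : PySem.Set Int × List Int) u =>
      if u ∈ st.1 then st else (PySem.Set.add st.1 u, st.2 ++ [u])) (V, l)).1 := by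
  intro ns
  induction ns with
  | nil => intro V l hx; exact hx
  | cons u rest ih =>
    intro V l hx
    simp only [List.foldl_cons]
    by_cases hu : u ∈ V
    · simp only [hu, if_true]; exact ih V l hx
    · simp only [hu, if_false]
      exact ih _ _ (by rw [PySem.Set.mem_add]; exact Or.inl hx)

-- every neighbour scanned ends up visited
lemma pvStepBAbsorb :
    ∀ (ns : List Int) (V : PySem.Set Int) (l : List Int) (x : Int), x ∈ ns →
    x ∈ (ns.foldl (fun (st : PySem.Set Int × List Int) u =>
      if u ∈ st.1 then st else (PySem.Set.add st.1 u, st.2 ++ [u])) (V, l)).1 := by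
  intro ns
  induction ns with
  | nil => intro V l x hx; simp at hx
  | cons u rest ih =>
    intro V l x hx
    rcases List.mem_cons.mp hx with h | h
    · subst h
      simp only [List.foldl_cons]
      by_cases hu : x ∈ V
      · simp only [hu, if_true]; exact pvStepBMono x rest V l hu
      · simp only [hu, if_false]
        exact pvStepBMono x rest _ _ (by rw [PySem.Set.mem_add]; exact Or.inr rfl)
    · simp only [List.foldl_cons]
      by_cases hu : u ∈ V
      · simp only [hu, if_true]; exact ih V l x h
      · simp only [hu, if_false]; exact ih _ _ x h

-- if every neighbour of v is visited, scanning them is a no-op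
lemma pvStepBNoop :
    ∀ (ns : List Int) (V : PySem.Set Int) (l : List Int), (∀ u ∈ ns, u ∈ V) →
    ns.foldl (fun (st : PySem.Set Int × List Int) u =>
      if u ∈ st.1 then st else (PySem.Set.add st.1 u, st.2 ++ [u])) (V, l) = (V, l) := by
  intro ns
  induction ns with
  | nil => intro V l _; rfl
  | cons u rest ih =>
    intro V l h
    simp only [List.foldl_cons, h u List.mem_cons_self, if_true]
    exact ih V l (fun x hx => h x (List.mem_cons_of_mem _ hx))

-- a frontier node all of whose neighbours are visited can be dropped from the frontier
lemma pvSkip (inter : List (Int × List Int)) (v : Int) :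
    ∀ (F : List Int) (s : PySem.Set Int × List Int),
    (∀ u ∈ (PySem.Dict.mk inter).getD v [], u ∈ s.1) →
    F.foldl (bfsInner inter) s = (PySem.Set.discard F v).foldl (bfsInner inter) s := by
  intro F
  induction F with
  | nil => intro s _; rfl
  | cons x F' ih =>
    intro s hs
    by_cases hx : x = v
    · subst hx
      have : PySem.Set.discard (x :: F') x = PySem.Set.discard F' x := by
        simp [PySem.Set.discard]
      rw [this, List.foldl_cons,
        show bfsInner inter s x = s by
          cases s; exact pvStepBNoop _ _ _ hs]
      exact ih s hs
    · have : PySem.Set.discard (x :: F') v = x :: PySem.Set.discard F' v := by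
        simp [PySem.Set.discard, hx]
      rw [this, List.foldl_cons, List.foldl_cons]
      refine ih (bfsInner inter s x) (fun u hu => ?_)
      cases s
      exact pvStepBMono u _ _ _ (hs u hu)

-- expanding a frontier ignores duplicate frontier entries
lemma pvDedupExpand (inter : List (Int × List Int)) :
    ∀ (F : List Int) (s : PySem.Set Int × List Int),
    F.foldl (bfsInner inter) s = (PySem.Set.ofList F).foldl (bfsInner inter) s := by
  intro F
  induction F with
  | nil => intro s; rfl
  | cons v F' ih =>
    intro s
    rw [PySem.Set.ofList_cons, List.foldl_cons, List.foldl_cons, ih (bfsInner inter s v)]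
    exact pvSkip inter v (PySem.Set.ofList F') (bfsInner inter s v)
      (fun u hu => by cases s with | mk V l => exact pvStepBAbsorb _ V l u hu)

-- membership tests do not see duplicates either
lemma pvAnyDedup (F cluster_B : List Int) :
    (PySem.Set.ofList F).any (fun v => decide (v ∈ cluster_B))
    = F.any (fun v => decide (v ∈ cluster_B)) := by
  rw [Bool.eq_iff_iff]
  simp [List.any_eq_true, PySem.Set.mem_ofList]

-- ===== VERDICT (by name: the statement is the Claim_ definition above) =====
theorem bfs_cluster_distance_spec : Claim_equal_bfs_cluster_distance := by
  intro inter cluster_A cluster_B max_depth _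
  unfold Spec_bfs_cluster_distance bfs_cluster_distance bfs_cluster_distance_alt
  rw [pvLoopEq inter cluster_B max_depth (max_depth + 1 - 0).toNat 0 rfl]
  conv_lhs => rw [bfsLoopB]
  conv_rhs => rw [bfsLoopB]
  simp only [pvAnyDedup, pvDedupExpand inter cluster_A]
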